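-- pv_equiv track=rewrite | github.com/poemyaya/ccks2018task2 | rules2.py | sentTochar
-- ===== SOURCE A (Python) =====
-- def sentTochar(sent,unionlist):
--     words = []
--     for i in range(len(unionlist)):
--         indexes = 0
--         if i>0:
--             for k in range(0,i,1):
--                 indexes = indexes + len(unionlist[k])
--
--         if 1 in unionlist[i]:
--             words.append(''.join([sent[j+indexes] for j in range(len(unionlist[i]))]))
--         else:
--             words.extend([sent[j+indexes] for j in range(len(unionlist[i]))])
--     return words
-- ===== SOURCE B (Python) =====
-- def sentTochar(sent, unionlist):
--     words = []
--     pos = 0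
--     for group in unionlist:
--         n = len(group)
--         chars = [sent[pos + j] for j in range(n)]
--         if 1 in group:
--             words.append(''.join(chars))
--         else:
--             words.extend(chars)
--         pos += n
--     return words
-- ===== Notes on version B (the rewrite author's own statement) =====
-- stated objective: simpler
-- what changed: B makes one pass keeping a running cumulative offset, instead of re-summing the lengths of all previous groups with an inner index loop for every group.
import Mathlib
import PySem

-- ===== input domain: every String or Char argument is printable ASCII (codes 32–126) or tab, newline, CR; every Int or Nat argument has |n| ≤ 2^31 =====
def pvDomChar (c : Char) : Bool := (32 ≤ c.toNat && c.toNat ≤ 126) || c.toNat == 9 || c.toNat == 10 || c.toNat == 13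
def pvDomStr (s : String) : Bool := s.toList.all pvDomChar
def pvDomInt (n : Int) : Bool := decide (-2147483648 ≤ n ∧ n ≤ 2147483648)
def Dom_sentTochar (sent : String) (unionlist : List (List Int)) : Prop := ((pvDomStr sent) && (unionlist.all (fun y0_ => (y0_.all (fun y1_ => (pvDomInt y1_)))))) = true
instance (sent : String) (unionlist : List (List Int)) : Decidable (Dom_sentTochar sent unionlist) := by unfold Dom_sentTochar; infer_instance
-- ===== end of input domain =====

-- B makes one pass with a running cumulative offset, instead of re-summing the
-- lengths of all previous groups with an inner loop for every group.
-- ===== PORT A =====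
-- literal transliteration: outer loop over range(len(unionlist)); inner loop re-sums
-- the lengths of the previous groups; chars fetched one by one with sent[j+indexes]
def sentTochar (sent : String) (unionlist : List (List Int)) : List String :=
  (PySem.List.pyRange 0 (unionlist.length : Int) 1).foldl
    (fun (words : List String) (i : Int) =>
      let indexes : Int :=
        if i > 0 then
          (PySem.List.pyRange 0 i 1).foldl
            (fun acc k => acc + ((PySem.List.pyGetD unionlist k []).length : Int)) 0
        else 0
      let grp := PySem.List.pyGetD unionlist i []
      -- [sent[j+indexes] for j in range(len(unionlist[i]))]; Pre_ excludes the IndexError case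
      let chars := (PySem.List.pyRange 0 (grp.length : Int) 1).map
        (fun j => PySem.List.pyGetD sent.toList (j + indexes) ' ')
      if (1 : Int) ∈ grp then words ++ [String.mk chars]
      else words ++ chars.map (fun c => String.mk [c]))
    []

-- ===== PORT B =====
def sentTochar_alt (sent : String) (unionlist : List (List Int)) : List String :=
  (unionlist.foldl
    (fun (st : List String × Int) grp =>
      let n : Int := (grp.length : Int)
      let chars := (PySem.List.pyRange 0 n 1).map
        (fun j => PySem.List.pyGetD sent.toList (st.2 + j) ' ')
      let words := if (1 : Int) ∈ grp then st.1 ++ [String.mk chars]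
                   else st.1 ++ chars.map (fun c => String.mk [c])
      (words, st.2 + n))
    ([], 0)).1

-- ===== PRECONDITION & SPEC =====
-- Pre_ excludes exactly the inputs where A raises IndexError: when the groups together
-- name more characters than sent has.
def Pre_sentTochar (sent : String) (unionlist : List (List Int)) : Prop :=
  (unionlist.map List.length).sum ≤ sent.toList.length
instance (sent : String) (unionlist : List (List Int)) : Decidable (Pre_sentTochar sent unionlist) := by unfold Pre_sentTochar; infer_instance

def pvWitness_sentTochar : String × List (List Int) := ("abc de", [[1, 1], [0], [1, 1, 1]])

def Spec_sentTochar (sent : String) (unionlist : List (List Int)) (out : List String) : Prop := out = sentTochar_alt sent unionlist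
instance (sent : String) (unionlist : List (List Int)) (out : List String) : Decidable (Spec_sentTochar sent unionlist out) := by unfold Spec_sentTochar; infer_instance

-- ===== CLAIM (what is proved, stated in full; the proofs are below) =====
def Claim_equal_sentTochar : Prop := ∀ (sent : String) (unionlist : List (List Int)), Dom_sentTochar sent unionlist → Pre_sentTochar sent unionlist → Spec_sentTochar sent unionlist (sentTochar sent unionlist)
-- ===== LEMMAS AND PROOFS =====

theorem pv_take_succ_sum (ul : List (List Int)) (m : Nat) (hm : m < ul.length) :
    ((ul.take (m+1)).map List.length).sum = ((ul.take m).map List.length).sum + (ul[m]).length := by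
  rw [List.take_succ, List.map_append, List.sum_append]
  simp [List.getElem?_eq_getElem hm]

-- A's inner loop: the re-summed prefix is the sum of the lengths of the first a groups.
theorem pv_sumlen (ul : List (List Int)) (a : Nat) (h : a ≤ ul.length) :
    (PySem.List.pyRange 0 (a : Int) 1).foldl
      (fun acc k => acc + ((PySem.List.pyGetD ul k []).length : Int)) 0
    = (((ul.take a).map List.length).sum : Int) := by
  induction a with
  | zero => simp [PySem.List.pyRange_one_eq_nil]
  | succ m ih =>
    have hm : m < ul.length := Nat.lt_of_lt_of_le (Nat.lt_succ_self m) h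
    have : ((m : Int) + 1) = ((m + 1 : Nat) : Int) := by push_cast; ring
    rw [← this, PySem.List.pyRange_one_succ_right (by positivity), List.foldl_append,
        ih (Nat.le_of_lt hm)]
    simp only [List.foldl_cons, List.foldl_nil]
    rw [PySem.List.pyGetD_natCast ul m [], List.getD_eq_getElem ul [] hm,
        pv_take_succ_sum ul m hm]
    push_cast; ring

-- main loop correspondence, by downward induction on the remaining group count
theorem pv_main (sent : String) (ul : List (List Int)) :
    ∀ k a (ws : List String), a + k = ul.length →
    (PySem.List.pyRange (a : Int) (ul.length : Int) 1).foldl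
      (fun (words : List String) (i : Int) =>
        let indexes : Int :=
          if i > 0 then
            (PySem.List.pyRange 0 i 1).foldl
              (fun acc k => acc + ((PySem.List.pyGetD ul k []).length : Int)) 0
          else 0
        let grp := PySem.List.pyGetD ul i []
        let chars := (PySem.List.pyRange 0 (grp.length : Int) 1).map
          (fun j => PySem.List.pyGetD sent.toList (j + indexes) ' ')
        if (1 : Int) ∈ grp then words ++ [String.mk chars]
        else words ++ chars.map (fun c => String.mk [c])) ws
    = ((ul.drop a).foldl
        (fun (st : List String × Int) grp =>
          let n : Int := (grp.length : Int)
          let chars := (PySem.List.pyRange 0 n 1).map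
            (fun j => PySem.List.pyGetD sent.toList (st.2 + j) ' ')
          let words := if (1 : Int) ∈ grp then st.1 ++ [String.mk chars]
                       else st.1 ++ chars.map (fun c => String.mk [c])
          (words, st.2 + n))
        (ws, ((((ul.take a).map List.length).sum : Nat) : Int))).1 := by
  intro k
  induction k with
  | zero =>
    intro a ws ha
    rw [PySem.List.pyRange_one_eq_nil (by omega), List.drop_eq_nil_of_le (by omega)]
    simp
  | succ m ih =>
    intro a ws ha
    have hlt : a < ul.length := by omega
    have hcons : PySem.List.pyRange (a : Int) (ul.length : Int) 1
        = (a : Int) :: PySem.List.pyRange ((a : Int) + 1) (ul.length : Int) 1 :=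
      PySem.List.pyRange_one_cons (by exact_mod_cast hlt)
    have hdrop : ul.drop a = ul[a] :: ul.drop (a + 1) := List.drop_eq_getElem_cons hlt
    rw [hcons, hdrop]
    simp only [List.foldl_cons]
    -- the A-step's state after processing index a
    have hget : PySem.List.pyGetD ul (a : Int) [] = ul[a] := by
      rw [PySem.List.pyGetD_natCast]; simp [List.getD, List.getElem?_eq_getElem hlt]
    have hsum : ∀ i : Int, i = (a : Int) →
        (if i > 0 then
            (PySem.List.pyRange 0 i 1).foldl
              (fun acc k => acc + ((PySem.List.pyGetD ul k []).length : Int)) 0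
          else 0) = ((((ul.take a).map List.length).sum : Nat) : Int) := by
      intro i hi; subst hi
      by_cases h0 : (a : Int) > 0
      · rw [if_pos h0, pv_sumlen ul a (Nat.le_of_lt hlt)]
      · have : a = 0 := by omega
        subst this; simp
    have hstep := pv_take_succ_sum ul a hlt
    have hseg : (PySem.List.pyRange 0 ((ul[a]).length : Int) 1).map
          (fun j => PySem.List.pyGetD sent.toList
            (j + ((((ul.take a).map List.length).sum : Nat) : Int)) ' ')
        = (PySem.List.pyRange 0 ((ul[a]).length : Int) 1).map
          (fun j => PySem.List.pyGetD sent.toList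
            (((((ul.take a).map List.length).sum : Nat) : Int) + j) ' ') := by
      simp only [Int.add_comm]
    have hnext : ((((ul.take a).map List.length).sum : Nat) : Int) + ((ul[a]).length : Int)
        = ((((ul.take (a+1)).map List.length).sum : Nat) : Int) := by
      rw [hstep]; push_cast; ring
    simp only [hget, hsum (a : Int) rfl, hseg]
    have hcast : ((a : Int) + 1) = ((a + 1 : Nat) : Int) := by push_cast; ring
    rw [hcast, hnext]
    exact ih (a + 1) _ (by omega)

-- ===== VERDICT (by name: the statement is the Claim_ definition above) =====
theorem sentTochar_spec : Claim_equal_sentTochar := by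
  intro sent ul _ _hpre
  unfold Spec_sentTochar sentTochar sentTochar_alt
  have := pv_main sent ul ul.length 0 [] (by omega)
  simpa using this
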